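-- pv_equiv track=rewrite | github.com/FAU-Inf2/RedBench | stats/stats.py | max_number_of_programs_per_bug
-- ===== SOURCE A (Python) =====
-- def max_number_of_programs_per_bug(programs_by_bug):
--     max_per_bug = 0
--     max_per_bug_and_fuzzer = 0
--
--     for bug in programs_by_bug:
--         per_bug = 0
--
--         for generator in programs_by_bug[bug]:
--             per_bug_and_fuzzer = len(programs_by_bug[bug][generator])
--             max_per_bug_and_fuzzer = max(max_per_bug_and_fuzzer, per_bug_and_fuzzer)
--
--             per_bug += per_bug_and_fuzzer
--
--         max_per_bug = max(max_per_bug, per_bug)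
--
--     return (max_per_bug, max_per_bug_and_fuzzer)
-- ===== SOURCE B (Python) =====
-- def _bug_stats(fuzzer_lists):
--     # divide-and-conquer over one bug's program lists -> (total programs, longest list)
--     n = len(fuzzer_lists)
--     if n == 0:
--         return (0, 0)
--     if n == 1:
--         l = len(fuzzer_lists[0])
--         return (l, l)
--     mid = n // 2
--     s1, m1 = _bug_stats(fuzzer_lists[:mid])
--     s2, m2 = _bug_stats(fuzzer_lists[mid:])
--     return (s1 + s2, m1 if m1 > m2 else m2)
--
--
-- def _overall(stats):
--     # divide-and-conquer tree reduction of per-bug (total, max) pairs by componentwise max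
--     n = len(stats)
--     if n == 0:
--         return (0, 0)
--     if n == 1:
--         return stats[0]
--     mid = n // 2
--     a1, b1 = _overall(stats[:mid])
--     a2, b2 = _overall(stats[mid:])
--     return (a1 if a1 > a2 else a2, b1 if b1 > b2 else b2)
--
--
-- def max_number_of_programs_per_bug(programs_by_bug):
--     stats = [_bug_stats(list(fuzzers.values())) for fuzzers in programs_by_bug.values()]
--     return _overall(stats)
-- ===== Notes on version B (the rewrite author's own statement) =====
-- stated objective: alternative
-- what changed: Replaced the single interleaved accumulator loop by a divide-and-conquer tree reduction: each bug's fuzzer lists are halved recursively to get (total, longest) pairs, and those pairs are again reduced by recursive halving with componentwise max.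
import Mathlib
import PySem

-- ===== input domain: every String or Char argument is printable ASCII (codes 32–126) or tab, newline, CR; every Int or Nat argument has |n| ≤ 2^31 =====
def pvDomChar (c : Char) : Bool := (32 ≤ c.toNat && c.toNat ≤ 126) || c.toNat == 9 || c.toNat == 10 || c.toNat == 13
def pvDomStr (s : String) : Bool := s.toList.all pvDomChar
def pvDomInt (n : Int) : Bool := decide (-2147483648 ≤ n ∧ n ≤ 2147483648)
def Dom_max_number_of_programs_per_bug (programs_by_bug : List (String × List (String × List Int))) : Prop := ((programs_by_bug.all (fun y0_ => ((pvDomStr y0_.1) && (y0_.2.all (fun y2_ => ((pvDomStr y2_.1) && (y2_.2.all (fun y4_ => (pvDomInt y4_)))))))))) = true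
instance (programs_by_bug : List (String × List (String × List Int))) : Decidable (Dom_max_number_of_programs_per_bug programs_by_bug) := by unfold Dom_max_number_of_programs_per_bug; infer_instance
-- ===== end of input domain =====

-- B replaces A's single interleaved accumulator loop by a divide-and-conquer tree
-- reduction (recursive halving, componentwise max/sum combine); objective: alternative.

-- ===== PORT A =====
-- One pass over the bugs; for each bug an inner pass over its fuzzers updating the
-- global max_per_bug_and_fuzzer and accumulating per_bug, then max_per_bug is updated.
def max_number_of_programs_per_bug (programs_by_bug : List (String × List (String × List Int))) : Int × Int :=
  programs_by_bug.foldl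
    (fun (acc : Int × Int) bug =>
      let inner := bug.2.foldl
        (fun (st : Int × Int) generator =>
          let per_bug_and_fuzzer : Int := (generator.2.length : Int)
          (st.1 + per_bug_and_fuzzer, max st.2 per_bug_and_fuzzer))
        (0, acc.2)
      (max acc.1 inner.1, inner.2))
    (0, 0)

-- ===== PORT B =====
-- _bug_stats: divide-and-conquer over one bug's program lists -> (total, longest)
def pvBugStats (fuzzer_lists : List (List Int)) : Int × Int :=
  if fuzzer_lists.length = 0 then (0, 0)
  else if fuzzer_lists.length = 1 then
    let l : Int := ((fuzzer_lists.headD []).length : Int)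
    (l, l)
  else
    let mid := fuzzer_lists.length / 2
    let p1 := pvBugStats (fuzzer_lists.take mid)
    let p2 := pvBugStats (fuzzer_lists.drop mid)
    (p1.1 + p2.1, if p1.2 > p2.2 then p1.2 else p2.2)
termination_by fuzzer_lists.length
decreasing_by
  · simp only [List.length_take]; omega
  · simp only [List.length_drop]; omega

-- _overall: divide-and-conquer reduction of the (total, max) pairs by componentwise max
def pvOverall (stats : List (Int × Int)) : Int × Int :=
  if stats.length = 0 then (0, 0)
  else if stats.length = 1 then stats.headD (0, 0)
  else
    let mid := stats.length / 2
    let q1 := pvOverall (stats.take mid)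
    let q2 := pvOverall (stats.drop mid)
    ((if q1.1 > q2.1 then q1.1 else q2.1), (if q1.2 > q2.2 then q1.2 else q2.2))
termination_by stats.length
decreasing_by
  · simp only [List.length_take]; omega
  · simp only [List.length_drop]; omega

def max_number_of_programs_per_bug_alt (programs_by_bug : List (String × List (String × List Int))) : Int × Int :=
  pvOverall (programs_by_bug.map (fun fuzzers => pvBugStats (fuzzers.2.map (fun kv => kv.2))))

-- ===== PRECONDITION & SPEC =====
def Spec_max_number_of_programs_per_bug (programs_by_bug : List (String × List (String × List Int))) (out : Int × Int) : Prop := out = max_number_of_programs_per_bug_alt programs_by_bug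
instance (programs_by_bug : List (String × List (String × List Int))) (out : Int × Int) : Decidable (Spec_max_number_of_programs_per_bug programs_by_bug out) := by unfold Spec_max_number_of_programs_per_bug; infer_instance

-- ===== CLAIM (what is proved, stated in full; the proofs are below) =====
def Claim_equal_max_number_of_programs_per_bug : Prop := ∀ (programs_by_bug : List (String × List (String × List Int))), Dom_max_number_of_programs_per_bug programs_by_bug → Spec_max_number_of_programs_per_bug programs_by_bug (max_number_of_programs_per_bug programs_by_bug)

-- ===== LEMMAS AND PROOFS =====

/-- running max from 0 -/
def pvM (xs : List Int) : Int := xs.foldl max 0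

lemma pv_fmax_out (xs : List Int) (a b : Int) :
    xs.foldl max (max a b) = max a (xs.foldl max b) := by
  induction xs generalizing b with
  | nil => rfl
  | cons x xs ih =>
      simp only [List.foldl_cons, max_assoc, ih]

lemma pv_fmax_nonneg (xs : List Int) (a : Int) (ha : 0 ≤ a) :
    xs.foldl max a = max a (pvM xs) := by
  have : max a 0 = a := max_eq_left ha
  rw [pvM, ← pv_fmax_out, this]

lemma pvM_nonneg (xs : List Int) : 0 ≤ pvM xs := by
  induction xs with
  | nil => simp [pvM]
  | cons x xs ih =>
      have := pv_fmax_nonneg xs (max 0 x) (le_max_left 0 x)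
      simp only [pvM, List.foldl_cons, this]
      exact le_trans ih (le_max_right _ _)

lemma pvM_append (l1 l2 : List Int) : pvM (l1 ++ l2) = max (pvM l1) (pvM l2) := by
  rw [pvM, List.foldl_append, show List.foldl max 0 l1 = pvM l1 from rfl,
      pv_fmax_nonneg l2 _ (pvM_nonneg l1)]

/-- lengths of the program lists of one bug -/
def pvLens (fuzzers : List (List Int)) : List Int :=
  fuzzers.map (fun progs => (progs.length : Int))

lemma pvBugStats_eq (ls : List (List Int)) :
    pvBugStats ls = ((pvLens ls).sum, pvM (pvLens ls)) := by
  fun_induction pvBugStats ls with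
  | case1 ls h =>
      rw [List.length_eq_zero_iff] at h; subst h; simp [pvLens, pvM]
  | case2 ls h0 h1 =>
      obtain ⟨x, rfl⟩ := List.length_eq_one_iff.mp h1
      show (((x.length : Int), (x.length : Int)) : Int × Int) = _
      simp [pvLens, pvM]
  | case3 ls h0 h1 mid p1 p2 ih1 ih2 =>
      have hp1 : p1 = _ := ih1
      have hp2 : p2 = _ := ih2
      rw [hp1, hp2]
      have hsplit : pvLens ls = pvLens (ls.take mid) ++ pvLens (ls.drop mid) := by
        simp [pvLens, ← List.map_append]
      rw [Prod.mk.injEq]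
      constructor
      · rw [hsplit, List.sum_append]
      · rw [hsplit, pvM_append, max_def]
        split_ifs with h2 h3 <;> omega

lemma pvOverall_eq (stats : List (Int × Int))
    (hnn : ∀ s ∈ stats, 0 ≤ s.1 ∧ 0 ≤ s.2) :
    pvOverall stats = (pvM (stats.map Prod.fst), pvM (stats.map Prod.snd)) := by
  fun_induction pvOverall stats with
  | case1 stats h =>
      rw [List.length_eq_zero_iff] at h; subst h; simp [pvM]
  | case2 stats h0 h1 =>
      obtain ⟨x, rfl⟩ := List.length_eq_one_iff.mp h1
      have := hnn x (by simp)
      show x = _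
      simp [pvM, Prod.ext_iff, max_eq_right this.1, max_eq_right this.2]
  | case3 stats h0 h1 mid q1 q2 ih1 ih2 =>
      have hq1 : q1 = _ := ih1 (fun s hs => hnn s (List.mem_of_mem_take hs))
      have hq2 : q2 = _ := ih2 (fun s hs => hnn s (List.mem_of_mem_drop hs))
      rw [hq1, hq2]
      have h1 : stats.map Prod.fst
          = (stats.take mid).map Prod.fst ++ (stats.drop mid).map Prod.fst := by
        simp [← List.map_append]
      have h2 : stats.map Prod.snd
          = (stats.take mid).map Prod.snd ++ (stats.drop mid).map Prod.snd := by
        simp [← List.map_append]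
      rw [Prod.mk.injEq]
      constructor
      · rw [h1, pvM_append, max_def]; split_ifs with h2 h3 <;> omega
      · rw [h2, pvM_append, max_def]; split_ifs with h2 h3 <;> omega

lemma pv_inner (gens : List (String × List Int)) (p m : Int) :
    gens.foldl
      (fun (st : Int × Int) generator =>
        let per_bug_and_fuzzer : Int := (generator.2.length : Int)
        (st.1 + per_bug_and_fuzzer, max st.2 per_bug_and_fuzzer)) (p, m)
      = (p + (pvLens (gens.map (fun kv => kv.2))).sum,
         (pvLens (gens.map (fun kv => kv.2))).foldl max m) := by
  induction gens generalizing p m with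
  | nil => simp [pvLens]
  | cons g gs ih =>
      simp only [List.foldl_cons]
      rw [ih]
      simp [pvLens, add_assoc]

lemma pv_outer (pbb : List (String × List (String × List Int))) (a b : Int) :
    pbb.foldl
      (fun (acc : Int × Int) bug =>
        let inner := bug.2.foldl
          (fun (st : Int × Int) generator =>
            let per_bug_and_fuzzer : Int := (generator.2.length : Int)
            (st.1 + per_bug_and_fuzzer, max st.2 per_bug_and_fuzzer))
          (0, acc.2)
        (max acc.1 inner.1, inner.2)) (a, b)
      = ((pbb.map (fun bug => (pvLens (bug.2.map (fun kv => kv.2))).sum)).foldl max a,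
         (pbb.flatMap (fun bug => pvLens (bug.2.map (fun kv => kv.2)))).foldl max b) := by
  induction pbb generalizing a b with
  | nil => simp
  | cons x xs ih =>
      simp only [List.foldl_cons, List.map_cons, List.flatMap_cons, List.foldl_append, pv_inner]
      simpa [pv_inner] using
        ih (max a (0 + (pvLens (x.2.map (fun kv => kv.2))).sum))
           ((pvLens (x.2.map (fun kv => kv.2))).foldl max b)

lemma pvM_cons (c : Int) (l : List Int) (hc : 0 ≤ c) : pvM (c :: l) = max c (pvM l) := by
  rw [pvM, List.foldl_cons, max_eq_right hc, pv_fmax_nonneg l c hc]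

lemma pvM_flatMap (pbb : List (String × List (String × List Int))) :
    pvM (pbb.flatMap (fun bug => pvLens (bug.2.map (fun kv => kv.2))))
      = pvM (pbb.map (fun bug => pvM (pvLens (bug.2.map (fun kv => kv.2))))) := by
  induction pbb with
  | nil => rfl
  | cons x xs ih =>
      simp only [List.flatMap_cons, List.map_cons]
      rw [pvM_append, ih, pvM_cons _ _ (pvM_nonneg _)]

theorem pv_main (pbb : List (String × List (String × List Int))) :
    max_number_of_programs_per_bug pbb = max_number_of_programs_per_bug_alt pbb := by
  unfold max_number_of_programs_per_bug max_number_of_programs_per_bug_alt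
  rw [pv_outer]
  have hnn : ∀ s ∈ pbb.map (fun fuzzers => pvBugStats (fuzzers.2.map (fun kv => kv.2))),
      0 ≤ s.1 ∧ 0 ≤ s.2 := by
    intro s hs
    simp only [List.mem_map] at hs
    obtain ⟨bug, _, rfl⟩ := hs
    rw [pvBugStats_eq]
    refine ⟨List.sum_nonneg ?_, pvM_nonneg _⟩
    intro y hy
    simp only [pvLens, List.mem_map] at hy
    obtain ⟨p, _, rfl⟩ := hy
    positivity
  rw [pvOverall_eq _ hnn]
  simp only [List.map_map]
  simp only [pvBugStats_eq]
  rw [Prod.mk.injEq]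
  exact ⟨rfl, pvM_flatMap pbb⟩

-- ===== VERDICT (by name: the statement is the Claim_ definition above) =====
theorem max_number_of_programs_per_bug_spec : Claim_equal_max_number_of_programs_per_bug := by
  intro pbb _
  exact pv_main pbb
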